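-- pv_equiv track=rewrite | github.com/pallamidessi/OW-tech-test | usage.py | compute_unique_words
-- ===== SOURCE A (Python) =====
-- from typing import List
--
-- COST_PARAMETERS_CENTS = {
--     "BASE_COST": 100,
--     "PALINDROME_MULTIPLIER": 2,
--     "COST_PER_CHARACTER": 5,
--     "LENGTH_PENALTY": 500,
--     "UNIQUE_WORDS_BONUS": -200,
--     "COST_PER_WORD": {"LESS_THEN_3": 10, "LESS_THEN_7": 20, "OTHER": 30},
-- }
--
-- def compute_unique_words(words: List[str]):
--     words_set = {}
--     duplicate_found = False
--
--     for word in words: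
--         if word in words_set:
--             duplicate_found = True
--             break
--         else:
--             words_set[word] = True
--
--     if duplicate_found:
--         return 0
--     else:
--         return COST_PARAMETERS_CENTS["UNIQUE_WORDS_BONUS"]
-- ===== SOURCE B (Python) =====
-- from typing import List
--
-- COST_PARAMETERS_CENTS = {
--     "BASE_COST": 100,
--     "PALINDROME_MULTIPLIER": 2,
--     "COST_PER_CHARACTER": 5,
--     "COST_PER_WORD": {"LESS_THEN_3": 10, "LESS_THEN_7": 20, "OTHER": 30},
--     "LENGTH_PENALTY": 500,
--     "UNIQUE_WORDS_BONUS": -200,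
-- }
--
-- def compute_unique_words(words: List[str]):
--     # Sort-based duplicate detection: after sorting, any duplicate words
--     # are adjacent, so one linear scan over neighbouring pairs decides it.
--     ordered = sorted(words)
--     for a, b in zip(ordered, ordered[1:]):
--         if a == b:
--             return 0
--     return COST_PARAMETERS_CENTS["UNIQUE_WORDS_BONUS"]
-- ===== Notes on version B (the rewrite author's own statement) =====
-- stated objective: alternative
-- what changed: Replaces the hash-based incremental membership loop (dict of seen words with an early break) with sort-then-adjacent-scan: sort the words once, then a single pass over neighbouring pairs detects any duplicate, since sorting makes equal words adjacent.
import Mathlib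
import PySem

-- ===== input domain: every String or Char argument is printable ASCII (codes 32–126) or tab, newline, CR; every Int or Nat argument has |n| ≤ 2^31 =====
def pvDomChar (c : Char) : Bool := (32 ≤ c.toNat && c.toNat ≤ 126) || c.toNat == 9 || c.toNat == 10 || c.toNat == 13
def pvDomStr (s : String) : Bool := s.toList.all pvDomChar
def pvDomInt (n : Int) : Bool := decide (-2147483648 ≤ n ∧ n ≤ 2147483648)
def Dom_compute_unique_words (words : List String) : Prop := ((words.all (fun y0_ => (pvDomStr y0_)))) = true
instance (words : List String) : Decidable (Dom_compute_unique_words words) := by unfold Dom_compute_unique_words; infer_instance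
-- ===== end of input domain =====

-- B replaces A's hash-membership loop (dict of seen words, early break) with
-- sort-then-adjacent-scan duplicate detection (alternative algorithm; same result).

-- ===== PORT A =====
-- the for-loop with its early break: walks words, stops at the first word already in the dict
def pvLoopA : List String → PySem.Dict String Bool → Bool
  | [], _ => false
  | w :: ws, seen =>
    if seen.contains w then true            -- duplicate_found = True; break
    else pvLoopA ws (seen.insert w true)    -- words_set[word] = True

def compute_unique_words (words : List String) : Int :=
  if pvLoopA words PySem.Dict.empty then 0
  else -200  -- COST_PARAMETERS_CENTS["UNIQUE_WORDS_BONUS"]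

-- ===== PORT B =====
-- the scan over zip(ordered, ordered[1:]) with its early 'return 0'
def pvAdjDup : List String → Bool
  | a :: b :: t => if a == b then true else pvAdjDup (b :: t)
  | _ => false

def compute_unique_words_alt (words : List String) : Int :=
  let ordered := PySem.List.sorted words (fun x => x) false
  if pvAdjDup ordered then 0
  else -200  -- COST_PARAMETERS_CENTS["UNIQUE_WORDS_BONUS"]

-- ===== PRECONDITION & SPEC =====
def Spec_compute_unique_words (words : List String) (out : Int) : Prop := out = compute_unique_words_alt words
instance (words : List String) (out : Int) : Decidable (Spec_compute_unique_words words out) := by unfold Spec_compute_unique_words; infer_instance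

-- ===== CLAIM (what is proved, stated in full; the proofs are below) =====
def Claim_equal_compute_unique_words : Prop := ∀ (words : List String), Dom_compute_unique_words words → Spec_compute_unique_words words (compute_unique_words words)

-- ===== LEMMAS AND PROOFS =====

-- A's loop returns false exactly when the remaining words are pairwise distinct and none is already seen
lemma pvLoopA_false_iff (ws : List String) (seen : PySem.Dict String Bool) :
    pvLoopA ws seen = false ↔ ws.Nodup ∧ ∀ w ∈ ws, seen.contains w = false := by
  induction ws generalizing seen with
  | nil => simp [pvLoopA]
  | cons w ws ih =>
    by_cases h : seen.contains w = true
    · simp only [pvLoopA, h, if_true]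
      constructor
      · intro hfalse; cases hfalse
      · rintro ⟨-, hall⟩
        have := hall w (List.mem_cons_self)
        rw [h] at this; cases this
    · have h' : seen.contains w = false := by simpa using h
      simp only [pvLoopA, h', Bool.false_eq_true, if_false, ih, List.nodup_cons,
        List.mem_cons, PySem.Dict.contains_insert]
      constructor
      · rintro ⟨hnd, hall⟩
        refine ⟨⟨fun hmem => ?_, hnd⟩, ?_⟩
        · have := hall w hmem; simp at this
        · rintro x (rfl | hx)
          · exact h'
          · have := hall x hx
            simp only [Bool.or_eq_false_iff] at this
            exact this.2
      · rintro ⟨⟨hnotin, hnd⟩, hall⟩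
        refine ⟨hnd, fun x hx => ?_⟩
        have hne : x ≠ w := fun hxe => hnotin (hxe ▸ hx)
        simp [hne, hall x (Or.inr hx)]

-- the empty dict contains nothing
lemma pvContains_empty (w : String) : (PySem.Dict.empty (κ := String) (ν := Bool)).contains w = false := by
  simp [PySem.Dict.contains, PySem.Dict.empty]

-- the adjacent scan returns false exactly when no two neighbouring elements are equal
lemma pvAdjDup_false_iff (ws : List String) :
    pvAdjDup ws = false ↔ List.IsChain (fun a b => a ≠ b) ws := by
  induction ws with
  | nil => simp [pvAdjDup]
  | cons a ws ih =>
    cases ws with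
    | nil => simp [pvAdjDup]
    | cons b t =>
      by_cases hab : a = b
      · subst hab; simp [pvAdjDup]
      · simp [pvAdjDup, hab, ih, List.isChain_cons_cons]

-- on a ≤-sorted list, no adjacent equal pair means pairwise distinct, and conversely
lemma pvSortedChain_iff_nodup (ws : List String) (hs : ws.Pairwise (fun a b => a ≤ b)) :
    List.IsChain (fun a b : String => a ≠ b) ws ↔ ws.Nodup := by
  constructor
  · intro hc
    have hchain_le : List.IsChain (fun a b : String => a ≤ b) ws := hs.isChain
    have hlt : List.IsChain (fun a b : String => a < b) ws := by
      rw [List.isChain_iff_getElem] at hchain_le hc ⊢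
      intro i hi
      exact lt_of_le_of_ne (hchain_le i hi) (hc i hi)
    have : ws.Pairwise (fun a b : String => a < b) :=
      List.isChain_iff_pairwise.mp hlt
    exact this.imp ne_of_lt
  · intro hnd
    exact hnd.isChain

-- ===== VERDICT (by name: the statement is the Claim_ definition above) =====
theorem compute_unique_words_spec : Claim_equal_compute_unique_words := by
  intro words _
  unfold Spec_compute_unique_words compute_unique_words compute_unique_words_alt
  show _ = if pvAdjDup (PySem.List.sorted words (fun x => x) false) = true then (0 : Int) else -200
  have hperm := PySem.List.sorted_perm (xs := words) (key := fun x => x) (rev := false)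
  have hnd_iff : (PySem.List.sorted words (fun x => x) false).Nodup ↔ words.Nodup :=
    hperm.nodup_iff
  have hB : pvAdjDup (PySem.List.sorted words (fun x => x) false) = false ↔ words.Nodup := by
    rw [pvAdjDup_false_iff,
      pvSortedChain_iff_nodup _ (PySem.List.sorted_pairwise words (fun x => x)), hnd_iff]
  have hA : pvLoopA words PySem.Dict.empty = false ↔ words.Nodup := by
    rw [pvLoopA_false_iff]
    exact ⟨fun h => h.1, fun h => ⟨h, fun w _ => pvContains_empty w⟩⟩
  by_cases hnd : words.Nodup
  · rw [hA.mpr hnd, hB.mpr hnd]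
  · have h1 : pvLoopA words PySem.Dict.empty = true := by
      by_contra h; exact hnd (hA.mp (by simpa using h))
    have h2 : pvAdjDup (PySem.List.sorted words (fun x => x) false) = true := by
      by_contra h; exact hnd (hB.mp (by simpa using h))
    rw [h1, h2]
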